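-- pv_equiv track=rewrite | github.com/towaanu/python-school | python_school/mytmp/graph_matrix.py | graph_to_adjacency_matrix
-- ===== SOURCE A (Python) =====
-- def graph_to_adjacency_matrix(graph):
--     graph_keys = list(graph.keys())
--     keys_length = len(graph_keys)
--
--     adjacency_matrix = [ [0 for j in range(keys_length)] for i in range(keys_length)]
--
--     for i in range(keys_length):
--         current_key = graph_keys[i]
--         neighbors = graph[current_key]
--
--         for j in range(keys_length):
--             if graph_keys[j] in neighbors:
--                 adjacency_matrix[i][j] = 1
--
--     return adjacency_matrix
-- ===== SOURCE B (Python) =====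
-- def graph_to_adjacency_matrix(graph):
--     keys = list(graph.keys())
--     n = len(keys)
--     index = {key: i for i, key in enumerate(keys)}
--
--     matrix = []
--     for key in keys:
--         row = [0] * n
--         for neighbor in graph[key]:
--             j = index.get(neighbor)
--             if j is not None:
--                 row[j] = 1
--         matrix.append(row)
--     return matrix
-- ===== Notes on version B (the rewrite author's own statement) =====
-- stated objective: faster
-- what changed: Instead of testing every key for membership in every neighbor list (nested V x V scans with an inner list search), B builds a key-to-index dict once and walks each node's neighbor list directly, setting matrix entries by index.
import Mathlib
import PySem

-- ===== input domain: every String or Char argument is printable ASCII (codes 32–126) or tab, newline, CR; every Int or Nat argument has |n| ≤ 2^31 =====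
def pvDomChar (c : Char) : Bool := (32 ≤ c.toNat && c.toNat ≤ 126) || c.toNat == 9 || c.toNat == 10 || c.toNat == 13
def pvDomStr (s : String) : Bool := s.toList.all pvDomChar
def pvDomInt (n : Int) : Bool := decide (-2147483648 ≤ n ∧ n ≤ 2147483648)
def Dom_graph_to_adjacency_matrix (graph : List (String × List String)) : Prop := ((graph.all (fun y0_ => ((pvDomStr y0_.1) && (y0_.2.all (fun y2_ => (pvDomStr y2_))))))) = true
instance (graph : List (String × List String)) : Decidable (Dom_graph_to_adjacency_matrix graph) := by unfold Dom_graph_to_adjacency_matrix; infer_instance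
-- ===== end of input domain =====

-- B replaces A's nested all-pairs membership scans by a key→index dictionary and a direct walk
-- over each node's neighbor list (objective: faster; asymptotic O(V²+E) vs O(V²·deg)).


-- ===== PORT A =====
def graph_to_adjacency_matrix (graph : List (String × List String)) : List (List Int) :=
  let graph_keys := (PySem.Dict.mk graph).keys
  let keys_length : Int := (graph_keys.length : Int)
  let adjacency_matrix : List (List Int) :=
    (PySem.List.pyRange 0 keys_length 1).map (fun _ =>
      (PySem.List.pyRange 0 keys_length 1).map (fun _ => (0 : Int)))
  (PySem.List.pyRange 0 keys_length 1).foldl (fun mat i =>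
    let current_key := (PySem.List.pyGet? graph_keys i).getD ""
    let neighbors := ((PySem.Dict.mk graph).get? current_key).getD []
    (PySem.List.pyRange 0 keys_length 1).foldl (fun mat j =>
      if neighbors.contains ((PySem.List.pyGet? graph_keys j).getD "") then
        mat.set i.toNat ((mat.getD i.toNat []).set j.toNat 1)
      else mat) mat) adjacency_matrix

-- ===== PORT B =====
-- index = {key: i for i, key in enumerate(keys)}
def pvBuildIndex (keys : List String) : PySem.Dict String Int :=
  (PySem.List.enumerate keys 0).foldl (fun d p => d.insert p.2 p.1) PySem.Dict.empty

def graph_to_adjacency_matrix_alt (graph : List (String × List String)) : List (List Int) :=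
  let keys := (PySem.Dict.mk graph).keys
  let n := keys.length
  let index := pvBuildIndex keys
  keys.foldl (fun matrix key =>
    let row := (((PySem.Dict.mk graph).get? key).getD []).foldl (fun row neighbor =>
      match index.get? neighbor with
      | some j => row.set j.toNat 1
      | none => row) (List.replicate n (0 : Int))
    matrix ++ [row]) []

-- ===== PRECONDITION & SPEC =====
-- The argument stands for a Python dict, whose keys are necessarily distinct; Pre_ states
-- exactly that (an association list with a duplicated key encodes no Python dict input of A).
def Pre_graph_to_adjacency_matrix (graph : List (String × List String)) : Prop :=
  (graph.map Prod.fst).Nodup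
instance (graph : List (String × List String)) : Decidable (Pre_graph_to_adjacency_matrix graph) := by
  unfold Pre_graph_to_adjacency_matrix; infer_instance

def pvWitness_graph_to_adjacency_matrix : (List (String × List String)) :=
  [("a", ["b"]), ("b", ["a", "c"]), ("c", [])]

def Spec_graph_to_adjacency_matrix (graph : List (String × List String)) (out : List (List Int)) : Prop := out = graph_to_adjacency_matrix_alt graph
instance (graph : List (String × List String)) (out : List (List Int)) : Decidable (Spec_graph_to_adjacency_matrix graph out) := by unfold Spec_graph_to_adjacency_matrix; infer_instance

-- ===== CLAIM (what is proved, stated in full; the proofs are below) =====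
def Claim_equal_graph_to_adjacency_matrix : Prop := ∀ (graph : List (String × List String)), Dom_graph_to_adjacency_matrix graph → Pre_graph_to_adjacency_matrix graph → Spec_graph_to_adjacency_matrix graph (graph_to_adjacency_matrix graph)

-- ===== LEMMAS AND PROOFS =====

-- A's inner loop: only row i of the matrix evolves
theorem pv_inner_factor (c : Nat → Prop) [DecidablePred c] (i : Nat) :
    ∀ (js : List Nat) (mat : List (List Int)), i < mat.length →
      (js.foldl (fun m j => if c j then m.set i ((m.getD i []).set j 1) else m) mat) =
      mat.set i (js.foldl (fun r j => if c j then r.set j 1 else r) (mat.getD i []) ) := by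
  intro js
  induction js with
  | nil =>
    intro mat hi
    simp [List.getD_eq_getElem?_getD, List.getElem?_eq_getElem hi, List.set_getElem_self hi]
  | cons j js ih =>
    intro mat hi
    by_cases hc : c j
    · simp only [List.foldl_cons, if_pos hc]
      rw [ih _ (by simpa using hi)]
      rw [List.set_set]
      congr 1
      simp [List.getD_eq_getElem?_getD, List.getElem?_set_self hi]
    · simp only [List.foldl_cons, if_neg hc]
      exact ih mat hi

-- A's outer loop over range k: rows 0..k-1 get replaced, rows ≥ k untouched
theorem pv_outer_factor (F : Nat → List Int → List Int) :
    ∀ (k : Nat) (mat : List (List Int)), k ≤ mat.length →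
      ((List.range k).foldl (fun m i => m.set i (F i (m.getD i []))) mat) =
      (List.range k).map (fun i => F i (mat.getD i [])) ++ mat.drop k := by
  intro k
  induction k with
  | zero => intro mat _; simp
  | succ k ih =>
    intro mat hk
    have hk' : k < mat.length := hk
    rw [List.range_succ, List.foldl_append, ih mat (Nat.le_of_lt hk')]
    simp only [List.foldl_cons, List.foldl_nil]
    rw [List.drop_eq_getElem_cons hk']
    have hlen : ((List.range k).map (fun i => F i (mat.getD i []))).length = k := by simp
    have hget : ((List.range k).map (fun i => F i (mat.getD i [])) ++ mat[k] :: mat.drop (k + 1)).getD k []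
        = mat[k] := by
      simp [List.getD_eq_getElem?_getD, List.getElem?_append_right, List.getElem?_eq_getElem hk']
    rw [hget, List.set_append, if_neg (by omega), hlen, Nat.sub_self, List.set_cons_zero]
    simp [List.map_append, List.getD_eq_getElem?_getD, List.getElem?_eq_getElem hk']

-- entry characterisation of A's row loop
theorem pv_rowA_get (c : Nat → Prop) [DecidablePred c] :
    ∀ (js : List Nat) (r : List Int) (k : Nat),
      ((js.foldl (fun r j => if c j then r.set j 1 else r) r)[k]?) =
      if k ∈ js ∧ c k ∧ k < r.length then some 1 else r[k]? := by
  intro js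
  induction js with
  | nil => intro r k; simp
  | cons j js ih =>
    intro r k
    simp only [List.foldl_cons]
    by_cases hc : c j
    · rw [if_pos hc, ih]
      by_cases h1 : k ∈ js ∧ c k ∧ k < r.length
      · rw [if_pos (by simpa using h1), if_pos ⟨List.mem_cons_of_mem _ h1.1, h1.2.1, h1.2.2⟩]
      · rw [if_neg (by simpa using h1)]
        by_cases hkj : k = j
        · subst hkj
          by_cases hkl : k < r.length
          · rw [List.getElem?_set_self hkl, if_pos ⟨List.mem_cons_self, hc, hkl⟩]
          · rw [if_neg (fun h => hkl h.2.2),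
              List.getElem?_eq_none (by simpa using Nat.le_of_not_lt hkl),
              List.getElem?_eq_none (Nat.le_of_not_lt hkl)]
        · rw [List.getElem?_set_ne (fun h => hkj h.symm)]
          rw [if_neg (fun h => h1 ⟨(List.mem_cons.mp h.1).resolve_left hkj, h.2⟩)]
    · rw [if_neg hc, ih]
      have heq : (k ∈ j :: js ∧ c k ∧ k < r.length) ↔ (k ∈ js ∧ c k ∧ k < r.length) := by
        constructor
        · rintro ⟨hm, hck, hl⟩
          rcases List.mem_cons.mp hm with rfl | hm
          · exact absurd hck hc
          · exact ⟨hm, hck, hl⟩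
        · exact fun h => ⟨List.mem_cons_of_mem _ h.1, h.2⟩
      simp only [heq]

-- entry characterisation of B's row loop
theorem pv_rowB_get (g : String → Option Nat) :
    ∀ (xs : List String) (r : List Int) (k : Nat),
      ((xs.foldl (fun r x => match g x with | some j => r.set j 1 | none => r) r)[k]?) =
      if (∃ x ∈ xs, g x = some k) ∧ k < r.length then some 1 else r[k]? := by
  intro xs
  induction xs with
  | nil => intro r k; simp
  | cons x xs ih =>
    intro r k
    simp only [List.foldl_cons]
    cases hgx : g x with
    | none =>
      rw [show (match (none : Option Nat) with | some j => r.set j 1 | none => r) = r from rfl, ih]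
      have heq : ((∃ y ∈ x :: xs, g y = some k) ∧ k < r.length) ↔
          ((∃ y ∈ xs, g y = some k) ∧ k < r.length) := by
        constructor
        · rintro ⟨⟨y, hy, hgy⟩, hl⟩
          rcases List.mem_cons.mp hy with rfl | hy
          · rw [hgx] at hgy; exact absurd hgy (by simp)
          · exact ⟨⟨y, hy, hgy⟩, hl⟩
        · rintro ⟨⟨y, hy, hgy⟩, hl⟩
          exact ⟨⟨y, List.mem_cons_of_mem _ hy, hgy⟩, hl⟩
      simp only [heq]
    | some j =>
      rw [show (match (some j : Option Nat) with | some j => r.set j 1 | none => r) = r.set j 1 from rfl, ih]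
      by_cases h1 : (∃ y ∈ xs, g y = some k) ∧ k < r.length
      · rw [if_pos (by simpa using h1),
          if_pos ⟨⟨h1.1.choose, List.mem_cons_of_mem _ h1.1.choose_spec.1, h1.1.choose_spec.2⟩, h1.2⟩]
      · rw [if_neg (by simpa using h1)]
        by_cases hkj : j = k
        · subst hkj
          by_cases hkl : j < r.length
          · rw [List.getElem?_set_self hkl, if_pos ⟨⟨x, List.mem_cons_self, hgx⟩, hkl⟩]
          · rw [if_neg (fun h => hkl h.2),
              List.getElem?_eq_none (by simpa using Nat.le_of_not_lt hkl),
              List.getElem?_eq_none (Nat.le_of_not_lt hkl)]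
        · rw [List.getElem?_set_ne hkj]
          rw [if_neg ?_]
          rintro ⟨⟨y, hy, hgy⟩, hl⟩
          rcases List.mem_cons.mp hy with rfl | hy
          · rw [hgx] at hgy; exact hkj (Option.some.inj hgy)
          · exact h1 ⟨⟨y, hy, hgy⟩, hl⟩

-- the key→index dict: items are the (key, position) pairs
theorem pv_index_items (ks : List String) (h : ks.Nodup) :
    (pvBuildIndex ks).items = (PySem.List.enumerate ks 0).map (fun p => (p.2, p.1)) := by
  unfold pvBuildIndex
  have := PySem.Dict.items_foldl_insert_fresh (PySem.List.enumerate ks 0)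
    (fun p => p.2) (fun p => p.1) (PySem.Dict.empty)
    (fun a _ => PySem.Dict.contains_empty _)
    (by rw [PySem.List.map_snd_enumerate]; exact h)
  simpa using this

theorem pv_index_keys (ks : List String) (h : ks.Nodup) : (pvBuildIndex ks).keys = ks := by
  simp only [PySem.Dict.keys, pv_index_items ks h, List.map_map]
  exact PySem.List.map_snd_enumerate ks 0

-- lookup in the index dict, read as a Nat index
theorem pv_index_get (ks : List String) (h : ks.Nodup) (nb : String) (k : Nat) :
    (((pvBuildIndex ks).get? nb).map Int.toNat = some k) ↔
      ∃ hk : k < ks.length, ks[k] = nb := by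
  constructor
  · intro hg
    rcases Option.map_eq_some_iff.mp hg with ⟨j, hj, hjk⟩
    have hm := (PySem.Dict.get?_eq_some_iff_mem_items _ _ _
      (by rw [pv_index_keys ks h]; exact h)).mp hj
    rw [pv_index_items ks h] at hm
    rcases List.mem_map.mp hm with ⟨p, hp, hpe⟩
    rcases (PySem.List.mem_enumerate_iff ks 0 p).mp hp with ⟨m, hm', rfl⟩
    simp only [Prod.mk.injEq] at hpe
    have : j = (m : Int) := by omega
    subst this
    have : k = m := by omega
    subst this
    exact ⟨hm', hpe.1.symm ▸ hpe.1⟩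
  · rintro ⟨hk, rfl⟩
    have hmem : (ks[k], (k : Int)) ∈ (pvBuildIndex ks).items := by
      rw [pv_index_items ks h]
      exact List.mem_map.mpr ⟨((k : Int), ks[k]),
        (PySem.List.mem_enumerate_iff ks 0 _).mpr ⟨k, hk, by simp⟩, rfl⟩
    rw [PySem.Dict.get?_of_mem_items _ hmem (by rw [pv_index_keys ks h]; exact h)]
    simp

-- outer loop of A rewritten so that each iteration is a pure row update
theorem pv_outer_bridge (c : Nat → Nat → Prop) [inst : ∀ i, DecidablePred (c i)] (n : Nat) :
    ∀ (js : List Nat) (mat : List (List Int)), (∀ i ∈ js, i < mat.length) →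
      js.foldl (fun m i => (List.range n).foldl
          (fun m' j => if c i j then m'.set i ((m'.getD i []).set j 1) else m') m) mat =
      js.foldl (fun m i => m.set i ((List.range n).foldl
          (fun r j => if c i j then r.set j 1 else r) (m.getD i []))) mat := by
  intro js
  induction js with
  | nil => intro mat _; rfl
  | cons i js ih =>
    intro mat hmem
    simp only [List.foldl_cons]
    rw [pv_inner_factor (c i) i (List.range n) mat (hmem i List.mem_cons_self)]
    exact ih _ (fun i' hi' => by
      rw [List.length_set]; exact hmem i' (List.mem_cons_of_mem _ hi'))

-- ===== VERDICT (by name: the statement is the Claim_ definition above) =====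
-- one row: A's range scan with membership test = B's neighbor walk through the index dict
theorem pv_row_eq (ks : List String) (hnd : ks.Nodup) (nbs : List String) :
    (List.range ks.length).foldl
        (fun r j => if nbs.contains (ks[j]?.getD "") = true then r.set j 1 else r)
        (List.replicate ks.length (0 : Int)) =
    nbs.foldl
        (fun row nb => match (pvBuildIndex ks).get? nb with
          | some j => row.set j.toNat 1
          | none => row)
        (List.replicate ks.length (0 : Int)) := by
  have hg : ∀ (row : List Int) (nb : String),
      (match (pvBuildIndex ks).get? nb with
        | some j => row.set j.toNat 1
        | none => row)
      = (match ((pvBuildIndex ks).get? nb).map Int.toNat with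
        | some j => row.set j 1
        | none => row) := by
    intro row nb; cases (pvBuildIndex ks).get? nb <;> rfl
  simp only [hg]
  apply List.ext_getElem?
  intro k
  rw [pv_rowA_get (fun j => nbs.contains (ks[j]?.getD "") = true),
    pv_rowB_get (fun nb => ((pvBuildIndex ks).get? nb).map Int.toNat)]
  by_cases hk : k < ks.length
  · have hiff : (k ∈ List.range ks.length ∧ nbs.contains (ks[k]?.getD "") = true ∧
        k < (List.replicate ks.length (0 : Int)).length)
        ↔ ((∃ nb ∈ nbs, ((pvBuildIndex ks).get? nb).map Int.toNat = some k) ∧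
        k < (List.replicate ks.length (0 : Int)).length) := by
      simp only [List.mem_range, List.length_replicate]
      constructor
      · rintro ⟨-, hcon, -⟩
        refine ⟨⟨ks[k], ?_, (pv_index_get ks hnd ks[k] k).mpr ⟨hk, rfl⟩⟩, hk⟩
        have := List.contains_iff_mem.mp hcon
        rwa [List.getElem?_eq_getElem hk, Option.getD_some] at this
      · rintro ⟨⟨nb, hnb, hgnb⟩, -⟩
        rcases (pv_index_get ks hnd nb k).mp hgnb with ⟨hk', rfl⟩
        refine ⟨hk, ?_, hk⟩
        rw [List.getElem?_eq_getElem hk, Option.getD_some]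
        exact List.contains_iff_mem.mpr hnb
    rw [if_congr hiff rfl rfl]
  · rw [if_neg (fun h => hk (List.mem_range.mp h.1)),
      if_neg (fun h => hk (by simpa using h.2))]

-- the whole of A's two loops = B's map over the keys
theorem pv_main (ks : List String) (nbr : String → List String) (hnd : ks.Nodup) :
    (List.range ks.length).foldl (fun x i => (List.range ks.length).foldl
        (fun m j => if (nbr (ks[i]?.getD "")).contains (ks[j]?.getD "") = true then
            m.set i ((m.getD i []).set j 1)
          else m) x)
      (List.replicate ks.length (List.replicate ks.length (0 : Int))) =
    ks.map (fun key => (nbr key).foldl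
        (fun row nb => match (pvBuildIndex ks).get? nb with
          | some j => row.set j.toNat 1
          | none => row)
        (List.replicate ks.length (0 : Int))) := by
  rw [pv_outer_bridge (fun i j => (nbr (ks[i]?.getD "")).contains (ks[j]?.getD "") = true)
    ks.length (List.range ks.length) _
    (fun i hi => by simpa using List.mem_range.mp hi)]
  rw [pv_outer_factor (fun i r => (List.range ks.length).foldl
      (fun r j => if (nbr (ks[i]?.getD "")).contains (ks[j]?.getD "") = true then r.set j 1 else r) r)
    ks.length _ (by simp)]
  rw [List.drop_replicate]
  simp only [Nat.sub_self, List.replicate_zero, List.append_nil]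
  apply List.ext_getElem?
  intro i
  simp only [List.getElem?_map]
  by_cases hi : i < ks.length
  · rw [List.getElem?_eq_getElem (by simpa using hi), List.getElem?_eq_getElem hi]
    simp only [List.getElem_range, Option.map_some]
    congr 1
    have hgetD : (List.replicate ks.length (List.replicate ks.length (0 : Int))).getD i []
        = List.replicate ks.length (0 : Int) := by
      rw [List.getD_eq_getElem?_getD, List.getElem?_replicate_of_lt hi, Option.getD_some]
    rw [hgetD, List.getElem?_eq_getElem hi, Option.getD_some]
    exact pv_row_eq ks hnd (nbr ks[i])
  · rw [List.getElem?_eq_none (by simpa using Nat.le_of_not_lt hi),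
      List.getElem?_eq_none (Nat.le_of_not_lt hi)]
    rfl

theorem graph_to_adjacency_matrix_spec : Claim_equal_graph_to_adjacency_matrix := by
  intro graph _ hpre
  unfold Spec_graph_to_adjacency_matrix
  unfold Pre_graph_to_adjacency_matrix at hpre
  simp only [graph_to_adjacency_matrix, graph_to_adjacency_matrix_alt]
  rw [PySem.List.foldl_append_singleton_eq_map, List.nil_append]
  rw [PySem.List.pyRange_zero_natCast]
  rw [List.foldl_map]
  simp only [List.foldl_map, PySem.List.pyGet?_natCast, Int.toNat_natCast, List.map_map,
    Function.comp_def, List.map_const', List.length_range]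
  exact pv_main (PySem.Dict.mk graph).keys
    (fun key => ((PySem.Dict.mk graph).get? key).getD []) hpre
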